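-- pv_equiv track=rewrite | github.com/drkohlipk/algorithms | python/helpers/testing/list_sort_tester.py | _test_contents
-- ===== SOURCE A (Python) =====
-- from typing import Callable, List
--
-- def _test_contents(
--     expected_list: List[int], test_list: List[int]
-- ) -> int:
--     content_obj = {}
--     num_failures = 0
--
--     if len(expected_list) != len(test_list):
--         num_failures += 1
--
--     for _, item in enumerate(expected_list):
--         content_obj[item] = (
--             0 if item not in content_obj else content_obj[item]) + 1
--
--     for _, item in enumerate(test_list):
--         if item in content_obj:
--             content_obj[item] -= 1
--
--             if content_obj[item] == 0:
--                 del content_obj[item]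
--
--         else:
--             num_failures += 1
--
--     if len(content_obj):
--         num_failures += 1
--
--     return num_failures
-- ===== SOURCE B (Python) =====
-- from typing import List
--
--
-- def _test_contents(
--     expected_list: List[int], test_list: List[int]
-- ) -> int:
--     exp_c = {}
--     for item in expected_list:
--         exp_c[item] = exp_c.get(item, 0) + 1
--
--     test_c = {}
--     for item in test_list:
--         test_c[item] = test_c.get(item, 0) + 1
--
--     failures = 1 if len(expected_list) != len(test_list) else 0
--     failures += sum(max(c - exp_c.get(item, 0), 0) for item, c in test_c.items())
--     if any(test_c.get(item, 0) < c for item, c in exp_c.items()):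
--         failures += 1
--     return failures
-- ===== Notes on version B (the rewrite author's own statement) =====
-- stated objective: simpler
-- what changed: Replaces A's sequential consume-and-delete loop over a shared count dict with two independent frequency tables and a closed arithmetic combination: sum of per-value excesses of test over expected plus a single flag for any unmatched expected item.
import Mathlib
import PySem

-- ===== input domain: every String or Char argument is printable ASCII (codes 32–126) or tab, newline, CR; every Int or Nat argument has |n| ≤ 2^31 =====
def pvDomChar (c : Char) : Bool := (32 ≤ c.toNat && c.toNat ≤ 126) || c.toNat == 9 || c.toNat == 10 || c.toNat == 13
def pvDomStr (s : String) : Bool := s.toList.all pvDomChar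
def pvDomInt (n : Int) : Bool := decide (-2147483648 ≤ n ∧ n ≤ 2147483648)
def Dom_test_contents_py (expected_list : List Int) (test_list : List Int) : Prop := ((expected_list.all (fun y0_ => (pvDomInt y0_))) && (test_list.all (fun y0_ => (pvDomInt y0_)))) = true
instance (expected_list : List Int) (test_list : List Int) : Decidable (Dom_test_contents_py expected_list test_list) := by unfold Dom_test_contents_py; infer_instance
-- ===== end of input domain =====

-- B replaces A's sequential consume-and-delete loop over one shared count dict with two
-- independent frequency tables combined arithmetically (objective: simpler decomposition).

-- ===== PORT A =====
def test_contents_py (expected_list : List Int) (test_list : List Int) : Int :=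
  -- num_failures = 1 if lengths differ (A's first check)
  let num_failures : Int := if expected_list.length ≠ test_list.length then 1 else 0
  -- first loop: content_obj[item] = (0 if item not in content_obj else content_obj[item]) + 1
  -- (content_obj[item] read under the membership guard is getD item 0 — exact, key present)
  let content_obj : PySem.Dict Int Int :=
    expected_list.foldl
      (fun d item => d.insert item ((if d.contains item = false then 0 else d.getD item 0) + 1))
      PySem.Dict.empty
  -- second loop over test_list, threading (content_obj, num_failures)
  let s : PySem.Dict Int Int × Int :=
    test_list.foldl
      (fun s item =>
        if s.1.contains item then
          let d := s.1.modify item 0 (fun v => v - 1)   -- content_obj[item] -= 1 (key present)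
          if d.getD item 0 = 0 then (d.erase item, s.2) else (d, s.2)
        else (s.1, s.2 + 1))
      (content_obj, num_failures)
  -- if len(content_obj): num_failures += 1
  if s.1.size ≠ 0 then s.2 + 1 else s.2

-- ===== PORT B =====
def test_contents_py_alt (expected_list : List Int) (test_list : List Int) : Int :=
  let exp_c : PySem.Dict Int Int :=
    expected_list.foldl (fun d x => d.insert x (d.getD x 0 + 1)) PySem.Dict.empty
  let test_c : PySem.Dict Int Int :=
    test_list.foldl (fun d x => d.insert x (d.getD x 0 + 1)) PySem.Dict.empty
  let failures0 : Int := if expected_list.length ≠ test_list.length then 1 else 0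
  let failures1 : Int :=
    failures0 + (test_c.items.map (fun p => max (p.2 - exp_c.getD p.1 0) 0)).sum
  if exp_c.items.any (fun p => test_c.getD p.1 0 < p.2) then failures1 + 1 else failures1

-- ===== PRECONDITION & SPEC =====
def Spec_test_contents_py (expected_list : List Int) (test_list : List Int) (out : Int) : Prop := out = test_contents_py_alt expected_list test_list
instance (expected_list : List Int) (test_list : List Int) (out : Int) : Decidable (Spec_test_contents_py expected_list test_list out) := by unfold Spec_test_contents_py; infer_instance

-- ===== CLAIM (what is proved, stated in full; the proofs are below) =====
def Claim_equal_test_contents_py : Prop := ∀ (expected_list : List Int) (test_list : List Int), Dom_test_contents_py expected_list test_list → Spec_test_contents_py expected_list test_list (test_contents_py expected_list test_list)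

-- ===== LEMMAS AND PROOFS =====

theorem pv_find?_filter (items : List (Int × Int)) (k k' : Int) :
    List.find? (fun p => p.1 == k') (List.filter (fun p => !p.1 == k) items)
      = if k' = k then none else List.find? (fun p => p.1 == k') items := by
  induction items with
  | nil => by_cases hk : k' = k <;> simp [hk]
  | cons p rest ih =>
    simp only [List.filter_cons]
    by_cases hp : p.1 = k
    · rw [show (!p.1 == k) = false by simp [hp]]
      simp only [Bool.false_eq_true, if_false, ih]
      by_cases hk : k' = k
      · simp [hk]
      · rw [if_neg hk, if_neg hk, List.find?_cons_of_neg (by simp [hp, Ne.symm hk])]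
    · rw [show (!p.1 == k) = true by simp [hp]]
      simp only [if_true]
      by_cases hq : p.1 = k'
      · have hk : ¬ k' = k := fun h => hp (hq.trans h)
        rw [if_neg hk, List.find?_cons_of_pos (by simp [hq]),
          List.find?_cons_of_pos (by simp [hq])]
      · rw [List.find?_cons_of_neg (by simp [hq]), ih,
          List.find?_cons_of_neg (by simp [hq])]

theorem pv_get?_erase (d : PySem.Dict Int Int) (k k' : Int) :
    (d.erase k).get? k' = if k' = k then none else d.get? k' := by
  obtain ⟨items⟩ := d
  simp only [PySem.Dict.erase, PySem.Dict.get?, pv_find?_filter]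
  by_cases hk : k' = k <;> simp [hk]

theorem pv_getD_erase (d : PySem.Dict Int Int) (k k' : Int) (v : Int) :
    (d.erase k).getD k' v = if k' = k then v else d.getD k' v := by
  rw [PySem.Dict.getD_eq_get?_getD, pv_get?_erase, PySem.Dict.getD_eq_get?_getD]
  by_cases h : k' = k <;> simp [h]

theorem pv_contains_erase (d : PySem.Dict Int Int) (k k' : Int) :
    (d.erase k).contains k' = if k' = k then false else d.contains k' := by
  rw [PySem.Dict.contains_eq_isSome_get?, pv_get?_erase, PySem.Dict.contains_eq_isSome_get?]
  by_cases h : k' = k <;> simp [h]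

theorem pv_nodup_keys_erase (d : PySem.Dict Int Int) (k : Int) (h : d.keys.Nodup) :
    (d.erase k).keys.Nodup := by
  obtain ⟨items⟩ := d
  simp only [PySem.Dict.erase, PySem.Dict.keys] at *
  exact h.sublist (List.Sublist.map _ List.filter_sublist)

theorem pv_size_ne_zero (d : PySem.Dict Int Int) :
    d.size ≠ 0 ↔ ∃ x, d.contains x = true := by
  obtain ⟨items⟩ := d
  cases items with
  | nil => simp [PySem.Dict.size, PySem.Dict.contains]
  | cons p rest =>
    simp only [PySem.Dict.size, PySem.Dict.contains]
    constructor
    · intro _; exact ⟨p.1, by simp⟩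
    · intro _; simp

def pvStep (s : PySem.Dict Int Int × Int) (item : Int) : PySem.Dict Int Int × Int :=
  if s.1.contains item then
    let d := s.1.modify item 0 (fun v => v - 1)
    if d.getD item 0 = 0 then (d.erase item, s.2) else (d, s.2)
  else (s.1, s.2 + 1)

theorem pv_sum_cons (a : Int) (rest : List Int) (f g : Int → Int) (δ : Int)
    (hne : ∀ y ∈ rest.toFinset, y ≠ a → f y = g y)
    (hyes : a ∈ rest.toFinset → f a = g a + δ)
    (hno : a ∉ rest.toFinset → f a = δ) :
    ∑ y ∈ (a :: rest).toFinset, f y = δ + ∑ y ∈ rest.toFinset, g y := by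
  rw [List.toFinset_cons]
  by_cases hm : a ∈ rest.toFinset
  · rw [Finset.insert_eq_self.2 hm, ← Finset.add_sum_erase _ f hm,
      ← Finset.add_sum_erase _ g hm, hyes hm,
      Finset.sum_congr rfl fun y hy =>
        hne y (Finset.mem_of_mem_erase hy) (Finset.mem_erase.1 hy).1]
    ring
  · rw [Finset.sum_insert hm, hno hm,
      Finset.sum_congr rfl fun y hy => hne y hy (fun h => hm (h ▸ hy))]

theorem pv_loopA (l : List Int) : ∀ (d : PySem.Dict Int Int) (nf : Int),
    d.keys.Nodup → (∀ x, d.contains x = true → 0 < d.getD x 0) →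
    (∀ x, (l.foldl pvStep (d, nf)).1.getD x 0 = max (d.getD x 0 - l.count x) 0) ∧
    (∀ x, (l.foldl pvStep (d, nf)).1.contains x = decide ((l.count x : Int) < d.getD x 0)) ∧
    (l.foldl pvStep (d, nf)).2
      = nf + ∑ y ∈ l.toFinset, max ((l.count y : Int) - d.getD y 0) 0 := by
  induction l with
  | nil =>
    intro d nf hnd hpos
    simp only [List.foldl_nil]
    refine ⟨fun x => ?_, fun x => ?_, by simp⟩
    · by_cases hc : d.contains x = true
      · have := hpos x hc; simp; omega
      · rw [PySem.Dict.getD_of_not_contains d 0 (by simpa using hc)]; simp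
    · by_cases hc : d.contains x = true
      · have := hpos x hc; simp [hc]; omega
      · rw [PySem.Dict.getD_of_not_contains d 0 (by simpa using hc)]
        simp at hc; simp [hc]
  | cons a rest ih =>
    intro d nf hnd hpos
    rw [List.foldl_cons]
    by_cases hc : d.contains a = true
    · have hcpos : 0 < d.getD a 0 := hpos a hc
      have hstep : pvStep (d, nf) a =
          (if (d.modify a 0 (fun v => v - 1)).getD a 0 = 0
           then ((d.modify a 0 (fun v => v - 1)).erase a, nf)
           else (d.modify a 0 (fun v => v - 1), nf)) := by
        simp [pvStep, hc]
      have hmod_getD : ∀ y, (d.modify a 0 (fun v => v - 1)).getD y 0 =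
          if y = a then d.getD a 0 - 1 else d.getD y 0 := fun y =>
        PySem.Dict.getD_modify d a y 0 _
      have hmod_nd : (d.modify a 0 (fun v => v - 1)).keys.Nodup := by
        rw [PySem.Dict.keys_modify, PySem.Dict.keys_insert_of_contains _ _ hc]; exact hnd
      by_cases hone : (d.modify a 0 (fun v => v - 1)).getD a 0 = 0
      · -- erase subcase: d.getD a 0 = 1
        have hc1 : d.getD a 0 = 1 := by rw [hmod_getD a] at hone; simp at hone; omega
        have h2getD : ∀ y, ((d.modify a 0 (fun v => v - 1)).erase a).getD y 0 =
            if y = a then d.getD a 0 - 1 else d.getD y 0 := by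
          intro y; rw [pv_getD_erase, hmod_getD y]
          by_cases hy : y = a <;> simp [hy, hc1]
        have h2cont : ∀ y, ((d.modify a 0 (fun v => v - 1)).erase a).contains y = true →
            0 < ((d.modify a 0 (fun v => v - 1)).erase a).getD y 0 := by
          intro y hy
          rw [pv_contains_erase] at hy
          by_cases hya : y = a
          · simp [hya] at hy
          · rw [h2getD, if_neg hya]
            rw [if_neg hya, PySem.Dict.contains_modify] at hy
            simp [hya] at hy
            exact hpos y hy
        have h2nd := pv_nodup_keys_erase _ a hmod_nd
        obtain ⟨ih1, ih2, ih3⟩ := ih ((d.modify a 0 (fun v => v - 1)).erase a) nf h2nd h2cont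
        rw [hstep, if_pos hone]
        refine ⟨fun x => ?_, fun x => ?_, ?_⟩
        · rw [ih1 x, h2getD x, List.count_cons]
          by_cases hx : x = a
          · subst hx; simp; omega
          · rw [if_neg hx, show (a == x) = false by simp [Ne.symm hx]]; simp
        · rw [ih2 x, h2getD x, List.count_cons]
          by_cases hx : x = a
          · subst hx; simp only [decide_eq_decide]; simp; omega
          · rw [if_neg hx, show (a == x) = false by simp [Ne.symm hx]]; simp
        · rw [ih3]
          rw [pv_sum_cons a rest _ (fun y => max ((rest.count y : Int)
                - ((d.modify a 0 (fun v => v - 1)).erase a).getD y 0) 0) 0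
            (fun y _ hy => by
              beta_reduce
              rw [h2getD y, if_neg hy, List.count_cons,
                show (a == y) = false by simp [Ne.symm hy]]; simp)
            (fun _ => by
              beta_reduce
              rw [h2getD a, if_pos rfl, List.count_cons]; simp; omega)
            (fun hm => by
              have hra : rest.count a = 0 := by
                rw [List.count_eq_zero]; simpa using hm
              rw [List.count_cons, hra]; simp [hc1])]
          ring
      · -- keep subcase: 2 ≤ d.getD a 0
        have hc2 : 2 ≤ d.getD a 0 := by rw [hmod_getD a] at hone; simp at hone; omega
        have h2cont : ∀ y, (d.modify a 0 (fun v => v - 1)).contains y = true →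
            0 < (d.modify a 0 (fun v => v - 1)).getD y 0 := by
          intro y hy
          rw [hmod_getD y]
          by_cases hya : y = a
          · simp [hya]; omega
          · rw [if_neg hya]
            rw [PySem.Dict.contains_modify] at hy
            simp [hya] at hy
            exact hpos y hy
        obtain ⟨ih1, ih2, ih3⟩ := ih (d.modify a 0 (fun v => v - 1)) nf hmod_nd h2cont
        rw [hstep, if_neg hone]
        refine ⟨fun x => ?_, fun x => ?_, ?_⟩
        · rw [ih1 x, hmod_getD x, List.count_cons]
          by_cases hx : x = a
          · subst hx; simp; omega
          · rw [if_neg hx, show (a == x) = false by simp [Ne.symm hx]]; simp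
        · rw [ih2 x, hmod_getD x, List.count_cons]
          by_cases hx : x = a
          · subst hx; simp only [decide_eq_decide]; simp; omega
          · rw [if_neg hx, show (a == x) = false by simp [Ne.symm hx]]; simp
        · rw [ih3]
          rw [pv_sum_cons a rest _ (fun y => max ((rest.count y : Int)
                - (d.modify a 0 (fun v => v - 1)).getD y 0) 0) 0
            (fun y _ hy => by
              beta_reduce
              rw [hmod_getD y, if_neg hy, List.count_cons,
                show (a == y) = false by simp [Ne.symm hy]]; simp)
            (fun _ => by
              beta_reduce
              rw [hmod_getD a, if_pos rfl, List.count_cons]; simp; omega)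
            (fun hm => by
              have hra : rest.count a = 0 := by
                rw [List.count_eq_zero]; simpa using hm
              rw [List.count_cons, hra]; simp; omega)]
          ring
    · -- item not in the dict: dict unchanged, one failure counted
      have hz : d.getD a 0 = 0 :=
        PySem.Dict.getD_of_not_contains d 0 (by simpa using hc)
      have hstep : pvStep (d, nf) a = (d, nf + 1) := by simp [pvStep, hc]
      obtain ⟨ih1, ih2, ih3⟩ := ih d (nf + 1) hnd hpos
      rw [hstep]
      refine ⟨fun x => ?_, fun x => ?_, ?_⟩
      · rw [ih1 x, List.count_cons]
        by_cases hx : x = a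
        · subst hx; simp [hz]
        · rw [show (a == x) = false by simp [Ne.symm hx]]; simp
      · rw [ih2 x, List.count_cons]
        by_cases hx : x = a
        · subst hx; simp only [decide_eq_decide]; simp [hz]; omega
        · rw [show (a == x) = false by simp [Ne.symm hx]]; simp
      · rw [ih3]
        rw [pv_sum_cons a rest _ (fun y => max ((rest.count y : Int) - d.getD y 0) 0) 1
          (fun y _ hy => by
            beta_reduce
            rw [List.count_cons, show (a == y) = false by simp [Ne.symm hy]]; simp)
          (fun _ => by
            beta_reduce
            rw [List.count_cons, hz]; simp; omega)
          (fun hm => by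
            have hra : rest.count a = 0 := by
              rw [List.count_eq_zero]; simpa using hm
            rw [List.count_cons, hra, hz]; simp)]
        ring

theorem pv_build (e : List Int) :
    e.foldl (fun d item => d.insert item
        ((if d.contains item = false then 0 else d.getD item 0) + 1)) PySem.Dict.empty
      = PySem.Dict.counter e := by
  rw [← PySem.Dict.foldl_insert_getD_add_one_eq_counter]
  congr 1
  funext d item
  by_cases h : d.contains item
  · simp [h]
  · rw [PySem.Dict.getD_of_not_contains d 0 (by simpa using h)]; simp [h]

theorem pv_toFinset_ofList (l : List Int) : (PySem.Set.ofList l).toFinset = l.toFinset := by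
  ext y; simp [List.mem_toFinset, PySem.Set.mem_ofList]

theorem pv_main (e t : List Int) : test_contents_py e t = test_contents_py_alt e t := by
  show test_contents_py e t = test_contents_py_alt e t
  unfold test_contents_py test_contents_py_alt
  simp only []
  rw [pv_build, PySem.Dict.foldl_insert_getD_add_one_eq_counter,
    PySem.Dict.foldl_insert_getD_add_one_eq_counter]
  have hpos : ∀ x, (PySem.Dict.counter e).contains x = true →
      0 < (PySem.Dict.counter e).getD x 0 := by
    intro x hx
    rw [PySem.Dict.contains_counter] at hx
    rw [PySem.Dict.getD_counter]
    have : x ∈ e := by simpa using hx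
    exact Int.natCast_pos.2 (List.count_pos_iff.2 this)
  obtain ⟨h1, h2, h3⟩ :=
    pv_loopA t (PySem.Dict.counter e) (if e.length ≠ t.length then (1:Int) else 0)
      (PySem.Dict.nodup_keys_counter e) hpos
  -- the port's fold function is definitionally pvStep
  have hfold : t.foldl
      (fun s item =>
        if (s : PySem.Dict Int Int × Int).1.contains item then
          let d := s.1.modify item 0 (fun v => v - 1)
          if d.getD item 0 = 0 then (d.erase item, s.2) else (d, s.2)
        else (s.1, s.2 + 1))
      (PySem.Dict.counter e, if e.length ≠ t.length then (1:Int) else 0)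
      = t.foldl pvStep (PySem.Dict.counter e, if e.length ≠ t.length then (1:Int) else 0) := rfl
  rw [hfold]
  -- B's sum equals the loop-invariant sum
  have hsumB : ((PySem.Dict.counter t).items.map
        (fun p => max (p.2 - (PySem.Dict.counter e).getD p.1 0) 0)).sum
      = ∑ y ∈ t.toFinset, max ((t.count y : Int) - (PySem.Dict.counter e).getD y 0) 0 := by
    rw [PySem.Dict.items_counter, List.map_map, ← pv_toFinset_ofList t,
      List.sum_toFinset _ (PySem.Set.nodup_ofList t)]
    rfl
  -- the two leftover conditions agree
  have hcond : ((t.foldl pvStep (PySem.Dict.counter e,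
        if e.length ≠ t.length then (1:Int) else 0)).1.size ≠ 0)
      ↔ ((PySem.Dict.counter e).items.any
          (fun p => (PySem.Dict.counter t).getD p.1 0 < p.2) = true) := by
    rw [pv_size_ne_zero]
    rw [PySem.Dict.items_counter, List.any_map]
    constructor
    · rintro ⟨x, hx⟩
      rw [h2 x, decide_eq_true_eq, PySem.Dict.getD_counter] at hx
      have hmem : x ∈ e := by
        have h0 : (0 : Int) < (e.count x : Int) := lt_of_le_of_lt (by positivity) hx
        have : 0 < e.count x := by exact_mod_cast h0
        exact List.count_pos_iff.1 this
      rw [List.any_eq_true]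
      refine ⟨x, by simpa [PySem.Set.mem_ofList] using hmem, ?_⟩
      simp [PySem.Dict.getD_counter]
      exact_mod_cast hx
    · intro hany
      rw [List.any_eq_true] at hany
      obtain ⟨y, _, hy⟩ := hany
      simp only [Function.comp, PySem.Dict.getD_counter, decide_eq_true_eq] at hy
      exact ⟨y, by rw [h2 y, decide_eq_true_eq, PySem.Dict.getD_counter]; exact_mod_cast hy⟩
  by_cases hc : (t.foldl pvStep (PySem.Dict.counter e,
      if e.length ≠ t.length then (1:Int) else 0)).1.size ≠ 0
  · rw [if_pos hc, if_pos (hcond.1 hc), h3, hsumB]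
  · rw [if_neg hc, if_neg (fun h => hc (hcond.2 h)), h3, hsumB]

-- ===== VERDICT (by name: the statement is the Claim_ definition above) =====
theorem test_contents_py_spec : Claim_equal_test_contents_py := by
  intro expected_list test_list _
  unfold Spec_test_contents_py
  exact pv_main expected_list test_list
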